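-- pv_equiv track=rewrite | github.com/CGEDJNU/Cplusplus_CGED | src/data_utils.py | wordToChar
-- ===== SOURCE A (Python) =====
-- def wordToChar(word, pos):
--   resw = []
--   resp = []
--   for i in range(len(word)):
--     for j in range(len(word[i])):
--       resw.append(word[i][j])
--       resp.append(('B-' if j == 0 else 'I-') + pos[i])
--   return resw, resp
-- ===== SOURCE B (Python) =====
-- def wordToChar(word, pos):
--     # staged passes: all chars at once; all tags first as I- tags, then patch
--     # the B- tag at each word's start offset
--     resw = list(''.join(word))
--     resp = ['I-' + p for w, p in zip(word, pos) for _ in w]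
--     off = 0
--     for w, p in zip(word, pos):
--         if w:
--             resp[off] = 'B-' + p
--         off += len(w)
--     return resw, resp
-- ===== Notes on version B (the rewrite author's own statement) =====
-- stated objective: alternative
-- what changed: Replaces A's single pass with a per-character j==0 conditional by a build-then-patch algorithm in staged passes: flatten all characters via ''.join at once, build every tag as an 'I-'+p tag in one bulk comprehension, then a second pass patches resp[off] = 'B-'+p at each word's start offset computed by a running length sum.
import Mathlib
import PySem

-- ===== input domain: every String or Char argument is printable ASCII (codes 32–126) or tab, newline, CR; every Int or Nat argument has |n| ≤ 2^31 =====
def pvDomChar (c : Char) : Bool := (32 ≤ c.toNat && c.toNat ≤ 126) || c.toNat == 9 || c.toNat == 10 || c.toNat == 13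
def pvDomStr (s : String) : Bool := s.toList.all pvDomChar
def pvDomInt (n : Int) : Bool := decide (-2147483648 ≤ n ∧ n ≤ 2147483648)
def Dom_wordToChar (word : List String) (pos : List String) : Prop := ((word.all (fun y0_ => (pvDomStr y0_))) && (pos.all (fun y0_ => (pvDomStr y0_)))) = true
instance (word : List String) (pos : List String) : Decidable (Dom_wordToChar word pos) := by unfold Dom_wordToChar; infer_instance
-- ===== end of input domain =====

-- B replaces A's single-pass per-character conditional emission by a staged
-- build-then-patch algorithm: flatten all characters at once, build every tag as
-- an 'I-' tag in bulk, then patch the 'B-' tag at each word's start offset.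

-- ===== PORT A =====
-- Literal transliteration of A: outer loop over range(len(word)), inner loop over
-- range(len(word[i])); word[i][j] is the j-th character (a one-char string).
def wordToChar (word : List String) (pos : List String) : List String × List String :=
  (PySem.List.pyRange 0 (word.length : Int)).foldl
    (fun res i =>
      (PySem.List.pyRange 0 (PySem.Str.len (PySem.List.pyGetD word i ""))).foldl
        (fun res2 j =>
          (res2.1 ++ [String.ofList [PySem.List.pyGetD (PySem.List.pyGetD word i "").toList j ' ']],
           res2.2 ++ [(if j = 0 then "B-" else "I-") ++ PySem.List.pyGetD pos i ""]))
        res)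
    ([], [])

-- ===== PORT B =====
-- Literal transliteration of B: resw = list(''.join(word)); resp built in bulk as
-- 'I-'+p per character over zip(word, pos); then the patch loop assigns
-- resp[off] = 'B-'+p at each non-empty word's start offset (off is a running sum of
-- lengths; resp[off] is ported as List.set, exact since the assignment index is
-- always in range: a non-empty word's start offset is below resp's length).
def wordToChar_alt (word : List String) (pos : List String) : List String × List String :=
  let resw := (PySem.Str.join "" word).toList.map (fun c => String.ofList [c])
  let resp0 := (word.zip pos).flatMap (fun wp => wp.1.toList.map (fun _ => "I-" ++ wp.2))
  let st := (word.zip pos).foldl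
    (fun st wp =>
      ((if wp.1.toList.isEmpty then st.1 else st.1.set st.2 ("B-" ++ wp.2)),
       st.2 + wp.1.toList.length))
    (resp0, 0)
  (resw, st.1)

-- ===== PRECONDITION & SPEC =====
-- Pre_ excludes exactly the inputs where A raises IndexError: a non-empty word at an
-- index beyond the length of pos (pos[i] is only read when word[i] has characters).
def Pre_wordToChar (word : List String) (pos : List String) : Prop :=
  ∀ s ∈ word.drop pos.length, s = ""
instance (word : List String) (pos : List String) : Decidable (Pre_wordToChar word pos) := by
  unfold Pre_wordToChar; infer_instance

def pvWitness_wordToChar : List String × List String := (["ab", "", "c"], ["N", "V", "A"])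

def Spec_wordToChar (word : List String) (pos : List String) (out : List String × List String) : Prop := out = wordToChar_alt word pos
instance (word : List String) (pos : List String) (out : List String × List String) : Decidable (Spec_wordToChar word pos out) := by unfold Spec_wordToChar; infer_instance

-- ===== CLAIM (what is proved, stated in full; the proofs are below) =====
def Claim_equal_wordToChar : Prop := ∀ (word : List String) (pos : List String), Dom_wordToChar word pos → Pre_wordToChar word pos → Spec_wordToChar word pos (wordToChar word pos)

-- ===== LEMMAS AND PROOFS =====

-- per-word blocks
def cBlk (w : String) : List String := w.toList.map (fun c => String.ofList [c])
def tBlkA (w p : String) : List String :=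
  (List.range w.toList.length).map (fun j => (if j = 0 then "B-" else "I-") ++ p)
def tBlkB (w p : String) : List String :=
  if w.toList.isEmpty then [] else ("B-" ++ p) :: List.replicate (w.toList.length - 1) ("I-" ++ p)
def iBlk (w p : String) : List String := w.toList.map (fun _ => "I-" ++ p)

lemma tBlk_eq (w p : String) : tBlkA w p = tBlkB w p := by
  unfold tBlkA tBlkB
  cases h : w.toList with
  | nil => simp
  | cons c cs =>
      simp [List.range_succ_eq_map, List.map_map, Function.comp_def, List.map_const']

-- A's result in closed form
lemma wordToChar_closed (word pos : List String) :
    wordToChar word pos =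
      ((List.range word.length).flatMap (fun k => cBlk (word.getD k "")),
       (List.range word.length).flatMap (fun k => tBlkA (word.getD k "") (pos.getD k ""))) := by
  unfold wordToChar
  rw [PySem.List.pyRange_zero_natCast, List.foldl_map]
  have hinner : ∀ (st : List String × List String) (k : Nat),
      (PySem.List.pyRange 0 (PySem.Str.len (PySem.List.pyGetD word (k : Int) ""))).foldl
        (fun res2 j =>
          (res2.1 ++ [String.ofList [PySem.List.pyGetD (PySem.List.pyGetD word (k : Int) "").toList j ' ']],
           res2.2 ++ [(if j = 0 then "B-" else "I-") ++ PySem.List.pyGetD pos (k : Int) ""]))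
        st
      = (st.1 ++ cBlk (word.getD k ""), st.2 ++ tBlkA (word.getD k "") (pos.getD k "")) := by
    intro st k
    rw [PySem.Str.len_eq, PySem.List.pyGetD_natCast, PySem.List.pyRange_zero_natCast, List.foldl_map]
    obtain ⟨a, b⟩ := st
    rw [PySem.List.foldl_prod_mk
        (f := fun acc (j : Nat) => acc ++ [String.ofList [PySem.List.pyGetD (word.getD k "").toList (j : Int) ' ']])
        (g := fun acc (j : Nat) => acc ++ [(if (j : Int) = 0 then "B-" else "I-") ++ PySem.List.pyGetD pos (k : Int) ""])]
    rw [PySem.List.foldl_append_singleton_eq_map, PySem.List.foldl_append_singleton_eq_map]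
    rw [Prod.mk.injEq]
    constructor
    · congr 1
      unfold cBlk
      apply List.ext_getElem (by simp)
      intro i h1 h2
      simp only [List.getElem_map, List.getElem_range]
      rw [PySem.List.pyGetD_natCast]
      congr 2
      have hi : i < (word.getD k "").toList.length := by simpa using h2
      rw [List.getD_eq_getElem?_getD, List.getElem?_eq_getElem hi]
      rfl
    · congr 1
      unfold tBlkA
      apply List.map_congr_left
      intro j hj
      rw [PySem.List.pyGetD_natCast]
      norm_num
  rw [PySem.List.foldl_congr_mem (List.range word.length) _
      (fun acc (k : Nat) => (acc.1 ++ cBlk (word.getD k ""), acc.2 ++ tBlkA (word.getD k "") (pos.getD k "")))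
      ([], []) (fun acc x _ => hinner acc x)]
  rw [PySem.List.foldl_prod_mk
      (f := fun acc (k : Nat) => acc ++ cBlk (word.getD k ""))
      (g := fun acc (k : Nat) => acc ++ tBlkA (word.getD k "") (pos.getD k ""))]
  rw [PySem.List.foldl_append_eq_flatMap, PySem.List.foldl_append_eq_flatMap]
  simp only [List.nil_append]

-- the char pass of B: ''.join flattens
lemma intersperse_nil_flatten (l : List (List Char)) :
    (List.intersperse ([] : List Char) l).flatten = l.flatten := by
  induction l with
  | nil => rfl
  | cons a t ih =>
    cases t with
    | nil => rfl
    | cons b u =>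
      simp only [List.intersperse, List.flatten_cons] at *
      simp [ih]

lemma join_chars (word : List String) :
    (PySem.Str.join "" word).toList.map (fun c => String.ofList [c]) = word.flatMap cBlk := by
  have h : (PySem.Str.join "" word).toList = (word.map String.toList).flatten := by
    simp [PySem.Str.join, PySem.Chars.join, List.intercalate, intersperse_nil_flatten]
  rw [h]
  unfold cBlk
  simp [List.map_flatten, List.flatMap_def, List.map_map, Function.comp_def]

-- set at the boundary of an append
lemma set_append_len {α : Type} (pre : List α) (a : α) (t : List α) (b : α) :
    (pre ++ a :: t).set pre.length b = pre ++ b :: t := by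
  induction pre with
  | nil => rfl
  | cons x xs ih => simp [ih]

-- the patch pass of B turns the all-I- tag list into the B-/I- blocks
lemma patch_go (l : List (String × String)) (pre : List String) :
    (l.foldl
      (fun st wp =>
        ((if wp.1.toList.isEmpty then st.1 else st.1.set st.2 ("B-" ++ wp.2)),
         st.2 + wp.1.toList.length))
      (pre ++ l.flatMap (fun wp => iBlk wp.1 wp.2), pre.length)).1
    = pre ++ l.flatMap (fun wp => tBlkB wp.1 wp.2) := by
  induction l generalizing pre with
  | nil => simp
  | cons wp rest ih =>
    simp only [List.flatMap_cons, List.foldl_cons]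
    by_cases hw : wp.1.toList.isEmpty
    · have hb : iBlk wp.1 wp.2 = [] := by unfold iBlk; simp [List.isEmpty_iff.mp hw]
      have ht : tBlkB wp.1 wp.2 = [] := by unfold tBlkB; simp [hw]
      simp only [hb, ht, List.nil_append, if_pos hw]
      have hlen : wp.1.toList.length = 0 := by simp [List.isEmpty_iff.mp hw]
      rw [hlen]
      simpa using ih pre
    · obtain ⟨c, cs, hcs⟩ : ∃ c cs, wp.1.toList = c :: cs := by
        cases h : wp.1.toList with
        | nil => exact absurd (by simp [h]) hw
        | cons c cs => exact ⟨c, cs, rfl⟩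
      have hi : iBlk wp.1 wp.2 = ("I-" ++ wp.2) :: List.replicate cs.length ("I-" ++ wp.2) := by
        unfold iBlk; rw [hcs]; simp [List.map_const']
      have ht : tBlkB wp.1 wp.2 = ("B-" ++ wp.2) :: List.replicate cs.length ("I-" ++ wp.2) := by
        unfold tBlkB; rw [hcs]; simp
      simp only [if_neg hw, hi, ht, List.cons_append]
      rw [set_append_len]
      have hpre' : (pre ++ ("B-" ++ wp.2) :: List.replicate cs.length ("I-" ++ wp.2)).length
          = pre.length + wp.1.toList.length := by
        simp only [List.length_append, List.length_cons, List.length_replicate, hcs]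
      have := ih (pre ++ ("B-" ++ wp.2) :: List.replicate cs.length ("I-" ++ wp.2))
      rw [hpre'] at this
      simpa [List.append_assoc] using this

-- B's result in closed form
lemma wordToChar_alt_closed (word pos : List String) :
    wordToChar_alt word pos =
      (word.flatMap cBlk,
       (word.zip pos).flatMap (fun wp => tBlkB wp.1 wp.2)) := by
  unfold wordToChar_alt
  have h2 := patch_go (word.zip pos) []
  simp only [List.nil_append, List.length_nil] at h2
  have hfl : (word.zip pos).flatMap (fun wp => wp.1.toList.map (fun _ => "I-" ++ wp.2))
      = (word.zip pos).flatMap (fun wp => iBlk wp.1 wp.2) := rfl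
  rw [Prod.mk.injEq]
  exact ⟨join_chars word, by rw [hfl, h2]⟩

lemma flatMap_range_succ_shift {α : Type} (n : Nat) (f : Nat → List α) :
    (List.range (n+1)).flatMap f = f 0 ++ (List.range n).flatMap (fun k => f (k+1)) := by
  simp [List.range_succ_eq_map, List.flatMap_map]

lemma flatMap_range_getD {α β : Type} (l : List α) (d : α) (f : α → List β) :
    (List.range l.length).flatMap (fun k => f (l.getD k d)) = l.flatMap f := by
  induction l with
  | nil => simp
  | cons a t ih =>
    simp only [List.length_cons]
    rw [flatMap_range_succ_shift]
    simp only [List.getD_cons_zero, List.getD_cons_succ, List.flatMap_cons, ih]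

lemma main_eq (word pos : List String) (h : Pre_wordToChar word pos) :
    wordToChar word pos = wordToChar_alt word pos := by
  induction word generalizing pos with
  | nil => rw [wordToChar_closed, wordToChar_alt_closed]; simp
  | cons w ws ih =>
    rw [wordToChar_closed, wordToChar_alt_closed]
    cases pos with
    | nil =>
        have hall : ∀ s ∈ w :: ws, s = "" := by
          intro s hs; exact h s (by simpa using hs)
        simp only [List.zip_nil_right, List.flatMap_nil]
        rw [Prod.mk.injEq]
        constructor
        · exact flatMap_range_getD (w :: ws) "" cBlk
        · rw [List.flatMap_eq_nil_iff]
          intro k hk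
          have hk' : k < (w :: ws).length := by simpa using hk
          have hx : (w :: ws)[k]?.getD "" = "" := by
            rw [List.getElem?_eq_getElem hk']
            simpa using hall _ (List.getElem_mem hk')
          simp [tBlkA, hx]
    | cons p ps =>
        have hpre' : Pre_wordToChar ws ps := by
          intro s hs; exact h s (by simpa using hs)
        have e := ih ps hpre'
        rw [wordToChar_closed, wordToChar_alt_closed] at e
        rw [Prod.mk.injEq] at e
        simp only [List.length_cons]
        rw [flatMap_range_succ_shift, flatMap_range_succ_shift]
        simp only [List.zip_cons_cons, List.flatMap_cons, List.getD_cons_zero, List.getD_cons_succ]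
        rw [Prod.mk.injEq]
        exact ⟨by rw [e.1], by rw [tBlk_eq, e.2]⟩

-- ===== VERDICT (by name: the statement is the Claim_ definition above) =====
theorem wordToChar_spec : Claim_equal_wordToChar := by
  intro word pos _ hpre
  unfold Spec_wordToChar
  exact main_eq word pos hpre
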